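-- pv_equiv track=rewrite | github.com/Jargonautika/Dissertation_Work | Experiments/Code/scripts/neural/PyTorch/sequence.py | getLongestSequence
-- ===== SOURCE A (Python) =====
-- def getLongestSequence(utterances, y_train):
--
--     result=1
--     max_result=0
--     last_seen=utterances[0]
--     new_y_train = [y_train[0]]
--
--     for i, v in enumerate(utterances[1:]):
--         if v == last_seen:
--             result += 1
--         else:
--             if result > max_result:
--                 max_result = result
--             last_seen = v
--             result = 1
--             new_y_train.append(y_train[i+1])
--
--     # just in case the longest sequence would be at the end of the list...
--     if result > max_result:
--         max_result = result
--
--     return max_result, new_y_train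
-- ===== SOURCE B (Python) =====
-- def getLongestSequence(utterances, y_train):
--     n = len(utterances)
--     starts = [i for i in range(n) if i == 0 or utterances[i] != utterances[i - 1]]
--     bounds = starts + [n]
--     max_result = max(bounds[j + 1] - bounds[j] for j in range(len(starts)))
--     new_y_train = [y_train[i] for i in starts]
--     return max_result, new_y_train
-- ===== Notes on version B (the rewrite author's own statement) =====
-- stated objective: alternative
-- what changed: A's fused one-pass state machine (running run-length, running max, last-seen element, incremental label list) is replaced by first materializing the list of run-start indices and then computing the answer as two independent reductions: max over consecutive differences of the boundary list, and indexing y_train at the start indices.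
import Mathlib
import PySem

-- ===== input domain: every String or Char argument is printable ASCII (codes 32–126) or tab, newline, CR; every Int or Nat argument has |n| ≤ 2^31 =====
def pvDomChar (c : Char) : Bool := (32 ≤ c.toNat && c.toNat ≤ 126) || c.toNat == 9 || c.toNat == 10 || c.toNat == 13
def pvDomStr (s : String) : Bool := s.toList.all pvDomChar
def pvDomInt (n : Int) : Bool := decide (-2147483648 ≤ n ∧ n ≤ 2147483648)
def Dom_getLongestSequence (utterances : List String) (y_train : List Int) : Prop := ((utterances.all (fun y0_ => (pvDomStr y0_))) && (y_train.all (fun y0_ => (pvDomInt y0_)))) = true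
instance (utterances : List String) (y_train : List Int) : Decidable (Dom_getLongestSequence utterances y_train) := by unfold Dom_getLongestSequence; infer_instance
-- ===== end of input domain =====

-- B replaces A's fused single-pass scan/state machine by first materializing the list of
-- run-start indices and then taking two independent reductions (max of consecutive
-- differences; indexing y_train at the starts); objective: alternative decomposition.

-- ===== PORT A =====
-- A's loop body; state = (result, max_result, last_seen, new_y_train), iv = (i, v).
def stepA (y_train : List Int) (st : Int × Int × String × List Int) (iv : Int × String) :
    Int × Int × String × List Int :=
  if iv.2 = st.2.2.1 then (st.1 + 1, st.2.1, st.2.2.1, st.2.2.2)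
  else (1, if st.1 > st.2.1 then st.1 else st.2.1, iv.2,
        st.2.2.2 ++ [(PySem.List.pyGet? y_train (iv.1 + 1)).getD 0])

def getLongestSequence (utterances : List String) (y_train : List Int) : Int × List Int :=
  -- utterances[0] / y_train[0] / y_train[i+1] raise IndexError when out of range;
  -- Pre_ excludes exactly those inputs, so the .getD defaults are never the value claimed.
  let last_seen := (PySem.List.pyGet? utterances 0).getD ""
  let new_y_train := [(PySem.List.pyGet? y_train 0).getD 0]
  let s := (PySem.List.enumerate (PySem.List.slice utterances (some 1) none)).foldl
    (stepA y_train) (1, 0, last_seen, new_y_train)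
  ((if s.1 > s.2.1 then s.1 else s.2.1), s.2.2.2)

-- ===== PORT B =====
def getLongestSequence_alt (utterances : List String) (y_train : List Int) : Int × List Int :=
  let n : Int := utterances.length
  let starts := (PySem.List.pyRange 0 n).filter
    (fun i => i == 0 || !(PySem.List.pyGet? utterances i == PySem.List.pyGet? utterances (i - 1)))
  let bounds := starts ++ [n]
  -- max(...) raises ValueError on an empty sequence (empty utterances): excluded by Pre_.
  let max_result := ((PySem.List.max? ((PySem.List.pyRange 0 (starts.length : Int)).map
      (fun j => (PySem.List.pyGet? bounds (j + 1)).getD 0 - (PySem.List.pyGet? bounds j).getD 0))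
      (fun x => x)).getD 0)
  let new_y_train := starts.map (fun i => (PySem.List.pyGet? y_train i).getD 0)
  (max_result, new_y_train)

-- ===== PRECONDITION & SPEC =====
-- Exactly the inputs on which A returns: A raises IndexError on empty utterances / empty
-- y_train, and whenever some run boundary index i (utterances[i] != utterances[i-1]) is
-- out of range for y_train.
def Pre_getLongestSequence (utterances : List String) (y_train : List Int) : Prop :=
  utterances ≠ [] ∧ y_train ≠ [] ∧
  ∀ i ∈ List.range utterances.length,
    (0 < i ∧ utterances[i]? ≠ utterances[i-1]?) → i < y_train.length
instance (utterances : List String) (y_train : List Int) : Decidable (Pre_getLongestSequence utterances y_train) := by unfold Pre_getLongestSequence; infer_instance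

def pvWitness_getLongestSequence : List String × List Int := (["a", "a", "b"], [1, 2, 3])

def Spec_getLongestSequence (utterances : List String) (y_train : List Int) (out : Int × List Int) : Prop := out = getLongestSequence_alt utterances y_train
instance (utterances : List String) (y_train : List Int) (out : Int × List Int) : Decidable (Spec_getLongestSequence utterances y_train out) := by unfold Spec_getLongestSequence; infer_instance

-- ===== CLAIM (what is proved, stated in full; the proofs are below) =====
def Claim_equal_getLongestSequence : Prop := ∀ (utterances : List String) (y_train : List Int), Dom_getLongestSequence utterances y_train → Pre_getLongestSequence utterances y_train → Spec_getLongestSequence utterances y_train (getLongestSequence utterances y_train)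

-- ===== LEMMAS AND PROOFS =====

-- run-start indices of xs, as naturals
def startsN (xs : List String) : List Nat :=
  (List.range xs.length).filter (fun i => i == 0 || !(xs[i]? == xs[i-1]?))

-- max of the consecutive differences inside S (0 if fewer than two elements)
def imax : List Nat → Int
  | a :: b :: r => max ((b : Int) - (a : Int)) (imax (b :: r))
  | _ => 0

-- consecutive differences of S ++ [n]
def dlist : List Nat → Nat → List Int
  | [], _ => []
  | [a], n => [(n : Int) - (a : Int)]
  | a :: b :: r, n => ((b : Int) - (a : Int)) :: dlist (b :: r) n

lemma zero_mem_startsN (u : String) (t : List String) : 0 ∈ startsN (u :: t) := by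
  simp [startsN, List.mem_filter, List.mem_range]

lemma startsN_ne_nil (u : String) (t : List String) : startsN (u :: t) ≠ [] :=
  List.ne_nil_of_mem (zero_mem_startsN u t)

lemma mem_startsN_lt {xs : List String} {i : Nat} (h : i ∈ startsN xs) : i < xs.length := by
  have := List.mem_of_mem_filter h
  simpa [List.mem_range] using this

lemma getLastD_mem {l : List Nat} (h : l ≠ []) : l.getLastD 0 ∈ l := by
  rw [List.getLastD_eq_getLast?, List.getLast?_eq_some_getLast h]
  exact List.getLast_mem h

lemma getLastD_startsN_lt (u : String) (t : List String) :
    (startsN (u :: t)).getLastD 0 < (u :: t).length :=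
  mem_startsN_lt (getLastD_mem (startsN_ne_nil u t))

lemma startsN_concat (xs : List String) (a : String) (hxs : xs ≠ []) :
    startsN (xs ++ [a]) =
      if a = xs.getLast hxs then startsN xs else startsN xs ++ [xs.length] := by
  have hn : 0 < xs.length := List.length_pos_of_ne_nil hxs
  unfold startsN
  have hlen : (xs ++ [a]).length = xs.length + 1 := by simp
  rw [hlen, List.range_succ, List.filter_append]
  have h1 : ∀ i ∈ List.range xs.length,
      ((i == 0) || !((xs ++ [a])[i]? == (xs ++ [a])[i-1]?)) =
      ((i == 0) || !(xs[i]? == xs[i-1]?)) := by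
    intro i hi
    rw [List.mem_range] at hi
    rw [List.getElem?_append_left hi,
        List.getElem?_append_left (lt_of_le_of_lt (Nat.sub_le i 1) hi)]
  rw [List.filter_congr h1]
  have h2 : (xs ++ [a])[xs.length]? = some a := List.getElem?_concat_length
  have h3 : (xs ++ [a])[xs.length - 1]? = some (xs.getLast hxs) := by
    rw [List.getElem?_append_left (by omega), List.getLast_eq_getElem]
    exact List.getElem?_eq_getElem (by omega)
  have hz : (xs.length == 0) = false := by simp; omega
  have h3' : (xs ++ [a])[xs.length - 1]'(by rw [hlen]; omega) = xs.getLast hxs := by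
    have h := h3
    rwa [List.getElem?_eq_getElem (by rw [hlen]; omega), Option.some.injEq] at h
  split_ifs with hcase
  · subst hcase
    simp [List.filter, hz, h3']
  · have : (a == xs.getLast hxs) = false := beq_eq_false_iff_ne.mpr hcase
    simp [List.filter, hz, h3', this]

lemma getLastD_default_irrel {l : List Nat} (h : l ≠ []) (d d' : Nat) :
    l.getLastD d = l.getLastD d' := by
  rw [List.getLastD_eq_getLast?, List.getLastD_eq_getLast?, List.getLast?_eq_some_getLast h]
  rfl

lemma imax_concat (S : List Nat) (n : Nat) (h : S ≠ []) :
    imax (S ++ [n]) = max (imax S) ((n : Int) - (S.getLastD 0 : Nat)) := by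
  induction S with
  | nil => exact absurd rfl h
  | cons a r ih =>
    cases r with
    | nil => simp [imax, max_comm, List.getLastD]
    | cons b r' =>
      have hbr := ih (by simp)
      have hirr := getLastD_default_irrel (l := b :: r') (by simp) a 0
      simp only [List.cons_append, imax]
      rw [show b :: (r' ++ [n]) = (b :: r') ++ [n] by simp, hbr, ← max_assoc]
      have hlast : ((a :: b :: r').getLastD 0) = ((b :: r').getLastD 0) := by
        rw [List.getLastD_cons, hirr]
      rw [hlast]

lemma dlist_length (S : List Nat) (n : Nat) : (dlist S n).length = S.length := by
  induction S with
  | nil => rfl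
  | cons a r ih =>
    cases r with
    | nil => rfl
    | cons b r' => simpa [dlist] using ih

lemma dlist_getElem (S : List Nat) (n : Nat) (j : Nat) (hj : j < S.length) :
    (dlist S n)[j]'(by rw [dlist_length]; exact hj) =
      ((S ++ [n]).getD (j+1) 0 : Nat) - ((S ++ [n]).getD j 0 : Nat) := by
  induction S generalizing j with
  | nil => exact absurd hj (by simp)
  | cons a r ih =>
    cases r with
    | nil =>
      cases j with
      | zero => simp [dlist, List.getD]
      | succ j' => exact absurd hj (by simp)
    | cons b r' =>
      cases j with
      | zero => simp [dlist, List.getD]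
      | succ j' =>
        have hj' : j' < (b :: r').length := by simpa using hj
        simpa [dlist, List.getD] using ih j' hj'

lemma maxOf_cons (x : Int) (l : List Int) (hl : l ≠ []) :
    ((PySem.List.max? (x :: l) (fun y => y)).getD 0) =
      max x ((PySem.List.max? l (fun y => y)).getD 0) := by
  cases l with
  | nil => exact absurd rfl hl
  | cons y tl =>
    rw [PySem.List.max?_id_cons, PySem.List.max?_id_cons]
    simp only [Option.getD_some, List.foldl_cons]
    exact List.foldl_assoc

lemma maxOf_dlist (S : List Nat) (n : Nat) (hne : S ≠ [])
    (hlt : ∀ i ∈ S, i < n) :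
    ((PySem.List.max? (dlist S n) (fun x => x)).getD 0) =
      max (imax S) ((n : Int) - (S.getLastD 0 : Nat)) := by
  induction S with
  | nil => exact absurd rfl hne
  | cons a r ih =>
    cases r with
    | nil =>
      have ha : a < n := hlt a (by simp)
      simp only [dlist, PySem.List.max?_id_cons, List.foldl_nil, Option.getD_some, imax,
        List.getLastD_cons]
      have : (0 : Int) ≤ (n : Int) - (a : Nat) := by
        have : (a : Int) < (n : Int) := by exact_mod_cast ha
        omega
      simp [List.getLastD]
      omega
    | cons b r' =>
      have hr : (b :: r') ≠ [] := by simp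
      have hd : dlist (b :: r') n ≠ [] := by
        intro hcon
        have := dlist_length (b :: r') n
        rw [hcon] at this
        simp at this
      have ihv := ih hr (fun i hi => hlt i (List.mem_cons_of_mem a hi))
      show ((PySem.List.max? (((b : Int) - (a : Int)) :: dlist (b :: r') n) (fun x => x)).getD 0) = _
      rw [maxOf_cons _ _ hd, ihv, ← max_assoc]
      have hirr := getLastD_default_irrel (l := b :: r') (by simp) a 0
      have hlast : ((a :: b :: r').getLastD 0) = ((b :: r').getLastD 0) := by
        rw [List.getLastD_cons, hirr]
      rw [hlast]
      simp only [imax]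

-- the invariant of A's loop, proved by reverse induction on the tail
lemma A_loop (u : String) (t : List String) (y : List Int) :
    (PySem.List.enumerate t).foldl (stepA y)
        (1, 0, u, [(PySem.List.pyGet? y 0).getD 0]) =
      ( ((u :: t).length : Int) - ((startsN (u :: t)).getLastD 0 : Nat),
        imax (startsN (u :: t)),
        (u :: t).getLastD "",
        (startsN (u :: t)).map (fun (i : Nat) => (PySem.List.pyGet? y (i : Int)).getD 0) ) := by
  induction t using List.reverseRecOn with
  | nil =>
    have hS : startsN [u] = [0] := by simp [startsN, List.filter]
    have h0 : PySem.List.pyGet? y 0 = y[0]? := PySem.List.pyGet?_natCast y 0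
    simp [PySem.List.enumerate_nil, hS, imax, h0]
  | append_singleton t a ih =>
    have hcons : u :: (t ++ [a]) = (u :: t) ++ [a] := by simp
    rw [hcons, PySem.List.enumerate_append, List.foldl_append, ih]
    rw [startsN_concat (u :: t) a (by simp)]
    have hlastlt : (startsN (u :: t)).getLastD 0 < t.length + 1 := by
      simpa using getLastD_startsN_lt u t
    have hSne := startsN_ne_nil u t
    have hgl : (u :: t).getLast (by simp) = (u :: t).getLastD "" := by
      rw [List.getLastD_eq_getLast?, List.getLast?_eq_some_getLast (by simp)]
      rfl
    have hgl' : ((u :: t) ++ [a]).getLastD "" = a := List.getLastD_concat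
    by_cases hcase : a = (u :: t).getLastD ""
    · rw [if_pos (hgl ▸ hcase)]
      simp only [PySem.List.enumerate_cons, PySem.List.enumerate_nil, List.foldl_cons,
        List.foldl_nil, stepA]
      rw [if_pos (by simpa using hcase)]
      simp only [Prod.mk.injEq]
      refine ⟨?_, trivial, ?_, trivial⟩
      · simp only [List.length_append, List.length_cons, List.length_nil]
        push_cast
        omega
      · rw [hgl']
        exact hcase.symm
    · rw [if_neg (hgl ▸ hcase)]
      simp only [PySem.List.enumerate_cons, PySem.List.enumerate_nil, List.foldl_cons,
        List.foldl_nil, stepA]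
      rw [if_neg (by simpa using hcase)]
      simp only [Prod.mk.injEq]
      have harg : ((0 : Int) + (t.length : Int)) + 1 = (((u :: t).length : Nat) : Int) := by
        simp
      refine ⟨?_, ?_, ?_, ?_⟩
      · rw [List.getLastD_concat]
        simp only [List.length_append, List.length_cons, List.length_nil]
        push_cast
        omega
      · rw [imax_concat _ _ hSne]
        omega
      · exact hgl'.symm
      · rw [List.map_append, harg]
        simp
        rw [show ((t.length : Int) + 1) = ((t.length + 1 : Nat) : Int) by omega,
          PySem.List.pyGet?_natCast]

lemma B_clean (u : String) (t : List String) (y : List Int) :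
    getLongestSequence_alt (u :: t) y =
      ( max (imax (startsN (u :: t)))
          (((u :: t).length : Int) - ((startsN (u :: t)).getLastD 0 : Nat)),
        (startsN (u :: t)).map (fun (i : Nat) => (PySem.List.pyGet? y (i : Int)).getD 0) ) := by
  have hSne := startsN_ne_nil u t
  have hstarts :
      ((PySem.List.pyRange 0 ((u :: t).length : Int)).filter
        (fun i => i == 0 ||
          !(PySem.List.pyGet? (u :: t) i == PySem.List.pyGet? (u :: t) (i - 1)))) =
      (startsN (u :: t)).map (fun (i : Nat) => (i : Int)) := by
    rw [PySem.List.pyRange_zero_nat, List.filter_map]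
    unfold startsN
    apply congrArg
    apply List.filter_congr
    intro i hi
    rw [List.mem_range] at hi
    by_cases h0 : i = 0
    · subst h0
      simp
    · have hi0 : (((i : Nat) : Int) == 0) = false := by
        simp
        omega
      have hn0 : (i == 0) = false := by simp [h0]
      simp only [Function.comp_apply, hi0, hn0, Bool.false_or]
      rw [PySem.List.pyGet?_natCast,
        show (((i : Nat) : Int) - 1) = ((i - 1 : Nat) : Int) by omega,
        PySem.List.pyGet?_natCast]
  have hdiffs :
      ((PySem.List.pyRange 0 ((((startsN (u :: t)).map (fun (i : Nat) => (i : Int))).length : Nat) : Int)).map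
        (fun j =>
          (PySem.List.pyGet? (((startsN (u :: t)).map (fun (i : Nat) => (i : Int))) ++ [((u :: t).length : Int)]) (j + 1)).getD 0 -
          (PySem.List.pyGet? (((startsN (u :: t)).map (fun (i : Nat) => (i : Int))) ++ [((u :: t).length : Int)]) j).getD 0)) =
      dlist (startsN (u :: t)) (u :: t).length := by
    have hb : (((startsN (u :: t)).map (fun (i : Nat) => (i : Int))) ++ [((u :: t).length : Int)]) =
        ((startsN (u :: t)) ++ [(u :: t).length]).map (fun (i : Nat) => (i : Int)) := by
      rw [List.map_append]
      simp
    rw [hb, PySem.List.pyRange_zero_nat, List.map_map]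
    apply List.ext_getElem
    · simp [dlist_length]
    · intro j hj1 hj2
      rw [dlist_length] at hj2
      simp only [List.length_map, List.length_range] at hj1
      simp only [List.getElem_map, List.getElem_range, Function.comp_apply]
      rw [show (((j : Nat) : Int) + 1) = ((j + 1 : Nat) : Int) by omega]
      rw [PySem.List.pyGet?_natCast, PySem.List.pyGet?_natCast]
      have hl : ((startsN (u :: t)) ++ [(u :: t).length]).length = (startsN (u :: t)).length + 1 := by
        simp
      rw [List.getElem?_map, List.getElem?_map,
        List.getElem?_eq_getElem (l := (startsN (u :: t)) ++ [(u :: t).length]) (by omega),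
        List.getElem?_eq_getElem (l := (startsN (u :: t)) ++ [(u :: t).length]) (by omega)]
      simp only [Option.map_some, Option.getD_some]
      rw [dlist_getElem _ _ j hj2,
        List.getD_eq_getElem _ _ (by omega), List.getD_eq_getElem _ _ (by omega)]
  simp only [getLongestSequence_alt]
  rw [hstarts, hdiffs, maxOf_dlist _ _ hSne (fun i hi => mem_startsN_lt hi), List.map_map]
  rfl

-- ===== VERDICT (by name: the statement is the Claim_ definition above) =====
theorem getLongestSequence_spec : Claim_equal_getLongestSequence := by
  unfold Claim_equal_getLongestSequence
  rintro utterances y _ ⟨hne, -, -⟩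
  unfold Spec_getLongestSequence
  obtain ⟨u, t, rfl⟩ : ∃ u t, utterances = u :: t := by
    cases utterances with
    | nil => exact absurd rfl hne
    | cons u t => exact ⟨u, t, rfl⟩
  have h0 : (PySem.List.pyGet? (u :: t) 0).getD "" = u := by
    simp [PySem.List.pyGet?, PySem.List.pyIdx?]
  simp only [getLongestSequence, PySem.List.slice_from_one, List.tail_cons, h0]
  rw [A_loop u t y, B_clean u t y]
  simp only [Prod.mk.injEq]
  exact ⟨by omega, trivial⟩
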